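-- pv_equiv track=rewrite | github.com/ATidiane/TAL | TMEs/TME3/TME3.py | constructDictionnary
-- ===== SOURCE A (Python) =====
-- def constructDictionnary(tousDocs):
--     """ Méthode de référence à base de dictionnaire """
--
--     dico = {}
--     for doc in tousDocs:
--         for elem in doc:
--             if elem[0] not in dico.keys():
--                 dico[elem[0]] = [elem[1]]
--             elif elem[1] not in dico[elem[0]]:
--                 dico[elem[0]].append(elem[1])
--
--     return dico
-- ===== SOURCE B (Python) =====
-- def constructDictionnary(tousDocs):
--     """Two-pass grouping: collect all values per key, then dedup keeping first occurrences."""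
--     groups = {}
--     for doc in tousDocs:
--         for elem in doc:
--             groups.setdefault(elem[0], []).append(elem[1])
--     return {k: list(dict.fromkeys(vs)) for k, vs in groups.items()}
-- ===== Notes on version B (the rewrite author's own statement) =====
-- stated objective: alternative
-- what changed: A maintains distinctness during its single scan (membership test and conditional append per element); B groups all values per key unconditionally in one pass and removes duplicates in a separate second pass with dict.fromkeys.
import Mathlib
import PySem

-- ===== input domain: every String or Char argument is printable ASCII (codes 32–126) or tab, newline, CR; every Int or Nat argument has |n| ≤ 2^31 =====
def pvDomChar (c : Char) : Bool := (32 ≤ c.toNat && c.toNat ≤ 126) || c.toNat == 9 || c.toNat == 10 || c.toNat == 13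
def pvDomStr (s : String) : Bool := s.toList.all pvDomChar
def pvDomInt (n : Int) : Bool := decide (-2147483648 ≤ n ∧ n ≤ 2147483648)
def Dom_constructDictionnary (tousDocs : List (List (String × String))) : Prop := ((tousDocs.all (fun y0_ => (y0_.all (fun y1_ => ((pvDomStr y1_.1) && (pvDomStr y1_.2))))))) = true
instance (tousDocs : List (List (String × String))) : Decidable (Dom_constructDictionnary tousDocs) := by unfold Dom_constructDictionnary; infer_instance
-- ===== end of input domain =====

-- B replaces A's maintain-distinct-while-scanning loop by an unconditional grouping pass
-- followed by a separate dedup pass (objective: alternative decomposition, same cost).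


-- ===== PORT A =====
-- A: one dict; for each (key, value): new key ↦ [value]; known key ↦ append value only if absent.
def constructDictionnary (tousDocs : List (List (String × String))) : List (String × List String) :=
  (tousDocs.foldl
    (fun dico doc => doc.foldl
      (fun dico elem =>
        if dico.contains elem.1 = false then dico.insert elem.1 [elem.2]
        else if elem.2 ∈ dico.getD elem.1 [] then dico
        else dico.modify elem.1 [] (· ++ [elem.2]))
      dico)
    PySem.Dict.empty).items

-- ===== PORT B =====
-- B: first pass groups every value under its key unconditionally (setdefault+append =
-- modify with default []); second pass dedups each value list (dict.fromkeys = PySem.List.dedup).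
def constructDictionnary_alt (tousDocs : List (List (String × String))) : List (String × List String) :=
  let groups : PySem.Dict String (List String) :=
    tousDocs.foldl
      (fun d doc => doc.foldl (fun d elem => d.modify elem.1 [] (· ++ [elem.2])) d)
      PySem.Dict.empty
  groups.items.map (fun p => (p.1, PySem.List.dedup p.2))

-- ===== PRECONDITION & SPEC =====
def Spec_constructDictionnary (tousDocs : List (List (String × String))) (out : List (String × List String)) : Prop := out = constructDictionnary_alt tousDocs
instance (tousDocs : List (List (String × String))) (out : List (String × List String)) : Decidable (Spec_constructDictionnary tousDocs out) := by unfold Spec_constructDictionnary; infer_instance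

-- ===== CLAIM (what is proved, stated in full; the proofs are below) =====
def Claim_equal_constructDictionnary : Prop := ∀ (tousDocs : List (List (String × String))), Dom_constructDictionnary tousDocs → Spec_constructDictionnary tousDocs (constructDictionnary tousDocs)

-- ===== LEMMAS AND PROOFS =====

-- "M d": the dict d with every value list deduplicated (B's second pass, applied to a dict).
def pvMapDedup (d : PySem.Dict String (List String)) : PySem.Dict String (List String) :=
  PySem.Dict.mk (d.items.map (fun p => (p.1, PySem.List.dedup p.2)))

-- A's per-element step and B's per-element step.
def pvStepA (dico : PySem.Dict String (List String)) (elem : String × String) : PySem.Dict String (List String) :=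
  if dico.contains elem.1 = false then dico.insert elem.1 [elem.2]
  else if elem.2 ∈ dico.getD elem.1 [] then dico
  else dico.modify elem.1 [] (· ++ [elem.2])

def pvStepB (d : PySem.Dict String (List String)) (elem : String × String) : PySem.Dict String (List String) :=
  d.modify elem.1 [] (· ++ [elem.2])

theorem pvMapDedup_contains (d : PySem.Dict String (List String)) (k : String) :
    (pvMapDedup d).contains k = d.contains k := by
  simp [pvMapDedup, PySem.Dict.contains, List.any_map, Function.comp_def]

theorem pvMapDedup_get? (d : PySem.Dict String (List String)) (k : String) :
    (pvMapDedup d).get? k = (d.get? k).map PySem.List.dedup := by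
  simp only [pvMapDedup, PySem.Dict.get?, List.find?_map]
  simp [Function.comp_def, Option.map_map]

theorem pvMapDedup_insert (d : PySem.Dict String (List String)) (k : String) (v : List String) :
    pvMapDedup (d.insert k v) = (pvMapDedup d).insert k (PySem.List.dedup v) := by
  apply PySem.Dict.ext
  simp only [pvMapDedup, PySem.Dict.insert, PySem.Dict.contains, List.any_map,
    Function.comp_def]
  by_cases h : (d.items.any fun p => p.1 == k) = true
  · simp only [h, if_true, List.map_map]
    refine List.map_congr_left (fun p _ => ?_)
    by_cases hk : p.1 = k <;> simp [hk]
  · simp [h]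

theorem pvInsert_same (d : PySem.Dict String (List String)) (k : String) (v : List String)
    (hnd : d.keys.Nodup) (hget : d.get? k = some v) : d.insert k v = d := by
  apply PySem.Dict.ext
  have hc : d.contains k = true := by
    rw [PySem.Dict.contains_eq_isSome_get?, hget]; rfl
  simp only [PySem.Dict.insert, hc, if_true]
  have hpt : ∀ p ∈ d.items, (if (p.1 == k) = true then (k, v) else p) = p := by
    intro p hp
    obtain ⟨a, b⟩ := p
    by_cases hk : a = k
    · subst hk
      have h2 : d.get? a = some b := PySem.Dict.get?_of_mem_items d hp hnd
      rw [hget] at h2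
      have hv : v = b := by injection h2
      simp [hv]
    · simp [hk]
  calc List.map (fun p => if (p.1 == k) = true then (k, v) else p) d.items
      = List.map id d.items := List.map_congr_left hpt
    _ = d.items := List.map_id _

theorem pvStep_comm (d : PySem.Dict String (List String)) (elem : String × String)
    (hnd : d.keys.Nodup) : pvStepA (pvMapDedup d) elem = pvMapDedup (pvStepB d elem) := by
  unfold pvStepA pvStepB PySem.Dict.modify
  rw [pvMapDedup_contains, pvMapDedup_insert]
  by_cases hc : d.contains elem.1 = true
  · obtain ⟨vs, hvs⟩ := Option.isSome_iff_exists.mp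
      (by rw [PySem.Dict.contains_eq_isSome_get?] at hc; exact hc)
    have hgd : d.getD elem.1 [] = vs := PySem.Dict.getD_of_get?_eq_some _ _ hvs
    have hgd' : (pvMapDedup d).getD elem.1 [] = PySem.List.dedup vs := by
      simp [PySem.Dict.getD, pvMapDedup_get?, hvs]
    rw [hc, hgd, hgd']
    by_cases hm : elem.2 ∈ vs
    · rw [if_neg (by simp), if_pos ((PySem.List.mem_dedup _ _).mpr hm)]
      rw [show PySem.List.dedup (vs ++ [elem.2]) = PySem.List.dedup vs by simp [pysem, hm]]
      exact (pvInsert_same (pvMapDedup d) elem.1 (PySem.List.dedup vs)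
        (by simpa [pvMapDedup, PySem.Dict.keys, List.map_map, Function.comp_def] using hnd)
        (by rw [pvMapDedup_get?, hvs]; rfl)).symm
    · rw [if_neg (by simp), if_neg (fun hmm => hm ((PySem.List.mem_dedup _ _).mp hmm))]
      rw [show PySem.List.dedup (vs ++ [elem.2]) = PySem.List.dedup vs ++ [elem.2] by
        simp [pysem, hm]]
  · have hc' : d.contains elem.1 = false := by simpa using hc
    have hgd : d.getD elem.1 [] = [] := PySem.Dict.getD_of_not_contains _ _ hc'
    rw [hc', hgd, if_pos rfl]
    congr 1

theorem pvFold_comm (l : List (String × String)) (d : PySem.Dict String (List String))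
    (hnd : d.keys.Nodup) :
    l.foldl pvStepA (pvMapDedup d) = pvMapDedup (l.foldl pvStepB d) := by
  induction l generalizing d with
  | nil => rfl
  | cons e rest ih =>
    simp only [List.foldl_cons, pvStep_comm d e hnd]
    exact ih (pvStepB d e) (by
      unfold pvStepB PySem.Dict.modify
      exact PySem.Dict.nodup_keys_insert _ _ _ hnd)

-- ===== VERDICT (by name: the statement is the Claim_ definition above) =====
theorem constructDictionnary_spec : Claim_equal_constructDictionnary := by
  intro tousDocs _
  unfold Spec_constructDictionnary constructDictionnary constructDictionnary_alt
  have hA : tousDocs.foldl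
      (fun dico doc => doc.foldl
        (fun dico elem =>
          if dico.contains elem.1 = false then dico.insert elem.1 [elem.2]
          else if elem.2 ∈ dico.getD elem.1 [] then dico
          else dico.modify elem.1 [] (· ++ [elem.2]))
        dico)
      PySem.Dict.empty = tousDocs.flatten.foldl pvStepA PySem.Dict.empty := by
    rw [List.foldl_flatten]; rfl
  have hB : tousDocs.foldl
      (fun d doc => doc.foldl (fun d elem => d.modify elem.1 [] (· ++ [elem.2])) d)
      PySem.Dict.empty = tousDocs.flatten.foldl pvStepB PySem.Dict.empty := by
    rw [List.foldl_flatten]; rfl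
  rw [hA, hB]
  have hM : (PySem.Dict.empty : PySem.Dict String (List String)) = pvMapDedup PySem.Dict.empty := rfl
  rw [hM, pvFold_comm _ _ (by simp [PySem.Dict.keys, PySem.Dict.empty])]
  rfl
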